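-- pv_equiv track=rewrite | github.com/TEAM-528/problem-solving | 정주완/Programmers/Level 2/택배 배달과 수거하기.py | solution
-- ===== SOURCE A (Python) =====
-- from collections import deque
--
-- def solution(cap, n, deliveries, pickups):
--     answer = 0
--
--     d_queue = deque([])
--     p_queue = deque([])
--
--     for i in range(n-1,-1,-1):
--         for _ in range(deliveries[i]):
--             d_queue.append(i+1)
--     for i in range(n-1,-1,-1):
--         for _ in range(pickups[i]):
--             p_queue.append(i+1)
--
--
--     while len(d_queue)+len(p_queue):
--         car=[]
--         while len(car)<cap and d_queue:
--             car.append(d_queue.popleft())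
--
--         if car:
--             delivery_distance = car[0]
--         else:
--             delivery_distance = 0
--
--         car=[]
--         while len(car)<cap and p_queue:
--             car.append(p_queue.popleft())
--
--         if car:
--             pickup_distance = car[0]
--         else:
--             pickup_distance = 0
--
--         answer += max(delivery_distance, pickup_distance) * 2
--
--     return answer
-- ===== SOURCE B (Python) =====
-- def solution(cap, n, deliveries, pickups):
--     # One O(n) sweep from the farthest house: suffix totals + ceil-division trip counts.
--     answer = 0
--     d = 0
--     p = 0
--     trips = 0
--     for i in range(n - 1, -1, -1):
--         d += max(deliveries[i], 0)
--         p += max(pickups[i], 0)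
--         t = max(-(-d // cap), -(-p // cap))
--         answer += (t - trips) * (i + 1) * 2
--         trips = t
--     return answer
-- ===== Notes on version B (the rewrite author's own statement) =====
-- stated objective: faster
-- what changed: A materializes one queue element per individual package (unary deques) and repeatedly pops up to cap items per trip; B does a single arithmetic sweep from the farthest house keeping suffix totals and ceil-division trip counts, so cost depends on n, not on the number of packages.
-- outside the precondition, e.g. on solution(0, 1, [0], [0]): A returns 0, B raises ZeroDivisionError
import Mathlib
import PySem

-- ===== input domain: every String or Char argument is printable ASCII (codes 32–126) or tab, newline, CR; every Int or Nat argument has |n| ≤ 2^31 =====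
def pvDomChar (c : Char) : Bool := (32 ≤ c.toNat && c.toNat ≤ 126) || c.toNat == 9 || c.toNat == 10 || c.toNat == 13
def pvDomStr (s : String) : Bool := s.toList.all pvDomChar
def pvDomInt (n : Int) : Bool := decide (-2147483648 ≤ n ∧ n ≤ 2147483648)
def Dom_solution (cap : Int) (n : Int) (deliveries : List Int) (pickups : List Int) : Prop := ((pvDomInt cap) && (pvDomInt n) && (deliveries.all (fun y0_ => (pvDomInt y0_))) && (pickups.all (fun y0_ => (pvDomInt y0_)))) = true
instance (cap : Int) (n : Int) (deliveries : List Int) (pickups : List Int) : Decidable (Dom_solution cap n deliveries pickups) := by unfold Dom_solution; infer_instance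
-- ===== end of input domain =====

-- B replaces A's unary per-package queues by one O(n) arithmetic sweep from the farthest
-- house (suffix totals + ceiling-division trip counts); measured asymptotically faster.


-- ===== PORT A =====
-- inner 'while len(car)<cap and queue: car.append(queue.popleft())'
def pvCarLoop (cap : Int) (car : List Int) (q : List Int) : List Int × List Int :=
  match q with
  | [] => (car, [])
  | x :: rest =>
    if (car.length : Int) < cap then pvCarLoop cap (car ++ [x]) rest
    else (car, x :: rest)

-- 'for i in range(n-1,-1,-1): for _ in range(counts[i]): queue.append(i+1)'
def pvBuildQueue (n : Int) (xs : List Int) : List Int :=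
  (PySem.List.pyRange (n - 1) (-1) (-1)).foldl
    (fun q i => q ++ List.replicate (PySem.List.pyGetD xs i 0).toNat (i + 1)) []

-- 'while len(d_queue)+len(p_queue): …'  (fuel = total queue length: the Python loop removes
-- at least one element per iteration whenever it terminates, i.e. whenever cap ≥ 1)
def pvMainLoop (cap : Int) : Nat → List Int → List Int → Int → Int
  | 0, _, _, ans => ans
  | fuel + 1, dq, pq, ans =>
    if dq.length + pq.length = 0 then ans
    else
      let r1 := pvCarLoop cap [] dq
      let dd := r1.1.headD 0
      let r2 := pvCarLoop cap [] pq
      let pd := r2.1.headD 0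
      pvMainLoop cap fuel r1.2 r2.2 (ans + max dd pd * 2)

def solution (cap : Int) (n : Int) (deliveries : List Int) (pickups : List Int) : Int :=
  let dq := pvBuildQueue n deliveries
  let pq := pvBuildQueue n pickups
  pvMainLoop cap (dq.length + pq.length) dq pq 0

-- ===== PORT B =====
-- one sweep from the farthest house: suffix totals d, p; t = trips needed so far
-- (ceiling division -(-d//cap)); pay the new trips at the current house.
def solution_alt (cap : Int) (n : Int) (deliveries : List Int) (pickups : List Int) : Int :=
  ((PySem.List.pyRange (n - 1) (-1) (-1)).foldl
    (fun (st : Int × Int × Int × Int) i =>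
      let d := st.2.1 + max (PySem.List.pyGetD deliveries i 0) 0
      let p := st.2.2.1 + max (PySem.List.pyGetD pickups i 0) 0
      let t := max (-(PySem.Int.floordiv (-d) cap)) (-(PySem.Int.floordiv (-p) cap))
      (st.1 + (t - st.2.2.2) * (i + 1) * 2, d, p, t))
    (0, 0, 0, 0)).1

-- ===== PRECONDITION & SPEC =====
-- Pre_ excludes (a) n larger than a list, where A raises IndexError, and (b) non-positive cap
-- with a package to move, where A's while-loop never terminates (and, at cap = 0 with only
-- non-positive counts, where A degenerately returns 0 but B's ceiling division divides by zero).
def Pre_solution (cap : Int) (n : Int) (deliveries : List Int) (pickups : List Int) : Prop :=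
  n ≤ deliveries.length ∧ n ≤ pickups.length ∧
    (1 ≤ cap ∨ n ≤ 0 ∨
      (cap ≠ 0 ∧ ∀ j ∈ List.range n.toNat, deliveries.getD j 0 ≤ 0 ∧ pickups.getD j 0 ≤ 0))
instance (cap : Int) (n : Int) (deliveries : List Int) (pickups : List Int) : Decidable (Pre_solution cap n deliveries pickups) := by unfold Pre_solution; infer_instance

def pvWitness_solution : Int × Int × List Int × List Int := (2, 2, [1, 0], [0, 3])

def Spec_solution (cap : Int) (n : Int) (deliveries : List Int) (pickups : List Int) (out : Int) : Prop := out = solution_alt cap n deliveries pickups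
instance (cap : Int) (n : Int) (deliveries : List Int) (pickups : List Int) (out : Int) : Decidable (Spec_solution cap n deliveries pickups out) := by unfold Spec_solution; infer_instance

-- ===== CLAIM (what is proved, stated in full; the proofs are below) =====
def Claim_equal_solution : Prop := ∀ (cap : Int) (n : Int) (deliveries : List Int) (pickups : List Int), Dom_solution cap n deliveries pickups → Pre_solution cap n deliveries pickups → Spec_solution cap n deliveries pickups (solution cap n deliveries pickups)

-- ===== LEMMAS AND PROOFS =====

-- ---- abstract layer: per-house package counts (far-first), houses = remaining length ----

-- the queue a far-first count list denotes (house of position j = length of the tail + 1)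
def pvQ : List Nat → List Int
  | [] => []
  | c :: rest => List.replicate c ((rest.length : Int) + 1) ++ pvQ rest

-- farthest house still holding a package (0 = none)
def pvFH : List Nat → Int
  | [] => 0
  | c :: rest => if c = 0 then pvFH rest else (rest.length : Int) + 1

-- remove k packages counting from the far end
def pvDec : Nat → List Nat → List Nat
  | _, [] => []
  | k, c :: rest => if c ≤ k then 0 :: pvDec (k - c) rest else (c - k) :: rest

-- ceiling division on Nat
def pvCeil (c x : Nat) : Nat := (x + c - 1) / c

-- prefix (= far-suffix) package total
def pvPre (l : List Nat) (j : Nat) : Nat := (l.take (j + 1)).sum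

-- round-based value of A's while loop, on count lists
def pvG (c : Nat) : Nat → List Nat → List Nat → Int
  | 0, _, _ => 0
  | fuel + 1, cs, ps =>
    if cs.sum + ps.sum = 0 then 0
    else max (pvFH cs) (pvFH ps) * 2 + pvG c fuel (pvDec c cs) (pvDec c ps)

-- house-based value of B's sweep, on count lists, with accumulators
def pvUL (c : Nat) : Nat → Nat → List Nat → List Nat → Nat
  | _, _, [], _ => 0
  | _, _, _ :: _, [] => 0
  | d, p, cc :: cs, pp :: ps =>
    max (pvCeil c (d + cc)) (pvCeil c (p + pp)) + pvUL c (d + cc) (p + pp) cs ps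

-- B's sweep with explicit trip telescoping, counts given as functions
def pvBRun (c : Nat) : Nat → (Nat → Nat) → (Nat → Nat) → Nat → Nat → Nat → Int
  | 0, _, _, _, _, _ => 0
  | m + 1, g1, g2, d, p, tr =>
    let d' := d + g1 0
    let p' := p + g2 0
    let t := max (pvCeil c d') (pvCeil c p')
    ((t : Int) - tr) * ((m : Int) + 1) * 2 +
      pvBRun c m (fun k => g1 (k + 1)) (fun k => g2 (k + 1)) d' p' t

-- count of house j in A's build (j = 0 is the farthest house, i = n-1-j)
def pvCnt (xs : List Int) (n : Int) (j : Nat) : Nat :=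
  (PySem.List.pyGetD xs (n - 1 - (j : Int)) 0).toNat

-- ---- Part A: the port of A equals pvG on count lists ----

lemma pvCarLoop_spec (cap : Int) (q : List Int) : ∀ car,
    pvCarLoop cap car q = (car ++ q.take (cap - car.length).toNat, q.drop (cap - car.length).toNat) := by
  induction q with
  | nil => intro car; simp [pvCarLoop]
  | cons x rest ih =>
    intro car
    rw [pvCarLoop]
    by_cases h : (car.length : Int) < cap
    · rw [if_pos h, ih]
      have h1 : (cap - (car.length : Int)).toNat = ((cap - ((car.length : Int) + 1)).toNat) + 1 := by
        omega
      have h2 : (car ++ [x]).length = car.length + 1 := by simp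
      rw [h2, h1]
      simp [List.take_succ_cons, List.drop_succ_cons]
    · rw [if_neg h]
      have h1 : (cap - (car.length : Int)).toNat = 0 := by omega
      simp [h1]

lemma take_headD (k : Nat) (hk : 1 ≤ k) (q : List Int) : (q.take k).headD 0 = q.headD 0 := by
  cases q with
  | nil => simp
  | cons x rest =>
    obtain ⟨k', rfl⟩ : ∃ k', k = k' + 1 := ⟨k - 1, by omega⟩
    simp [List.take_succ_cons]

lemma pvQ_headD (cs : List Nat) : (pvQ cs).headD 0 = pvFH cs := by
  induction cs with
  | nil => simp [pvQ, pvFH]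
  | cons c rest ih =>
    by_cases h : c = 0
    · simpa [pvQ, pvFH, h] using ih
    · obtain ⟨c', rfl⟩ : ∃ c', c = c' + 1 := ⟨c - 1, by omega⟩
      simp [pvQ, pvFH, List.replicate_succ]

lemma pvQ_length (cs : List Nat) : (pvQ cs).length = cs.sum := by
  induction cs with
  | nil => simp [pvQ]
  | cons c rest ih => simp [pvQ, ih]

lemma pvDec_length (k : Nat) (cs : List Nat) : (pvDec k cs).length = cs.length := by
  induction cs generalizing k with
  | nil => simp [pvDec]
  | cons c rest ih =>
    rw [pvDec]
    split_ifs <;> simp [ih]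

lemma pvDec_sum (k : Nat) (cs : List Nat) : (pvDec k cs).sum = cs.sum - k := by
  induction cs generalizing k with
  | nil => simp [pvDec]
  | cons c rest ih =>
    rw [pvDec]
    split_ifs with h
    · simp [ih]; omega
    · simp; omega

lemma pvQ_drop (k : Nat) (cs : List Nat) : (pvQ cs).drop k = pvQ (pvDec k cs) := by
  induction cs generalizing k with
  | nil => simp [pvQ, pvDec]
  | cons c rest ih =>
    rw [pvQ, pvDec]
    split_ifs with h
    · rw [List.drop_append, List.drop_replicate, List.length_replicate,
        show c - k = 0 from by omega, ih]
      simp [pvQ]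
    · rw [List.drop_append, List.drop_replicate, List.length_replicate,
        show k - c = 0 from by omega]
      simp [pvQ]

lemma pvMainLoop_eq_G (cap : Int) (hc : 1 ≤ cap) :
    ∀ (fuel : Nat) (cs ps : List Nat) (ans : Int),
    pvMainLoop cap fuel (pvQ cs) (pvQ ps) ans = ans + pvG cap.toNat fuel cs ps := by
  intro fuel
  induction fuel with
  | zero => intro cs ps ans; rw [pvMainLoop, pvG]; ring
  | succ f ih =>
    intro cs ps ans
    have hcar : ∀ q : List Int, pvCarLoop cap [] q = (q.take cap.toNat, q.drop cap.toNat) := by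
      intro q; rw [pvCarLoop_spec]; simp
    rw [pvMainLoop, pvG]
    by_cases h : cs.sum + ps.sum = 0
    · rw [if_pos (by rw [pvQ_length, pvQ_length]; omega), if_pos h]
      ring
    · rw [if_neg (by rw [pvQ_length, pvQ_length]; omega), if_neg h]
      simp only [hcar]
      rw [take_headD _ (by omega), take_headD _ (by omega), pvQ_headD, pvQ_headD,
        pvQ_drop, pvQ_drop, ih]
      ring

lemma pvQ_map_range (m : Nat) : ∀ (g : Nat → Nat),
    pvQ ((List.range m).map g)
      = (List.range m).flatMap (fun j => List.replicate (g j) ((m : Int) - j)) := by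
  induction m with
  | zero => intro g; simp [pvQ]
  | succ m ih =>
    intro g
    rw [List.range_succ_eq_map]
    simp only [List.map_cons, List.map_map, List.flatMap_cons, List.flatMap_map]
    rw [pvQ, ih (g ∘ Nat.succ)]
    congr 1
    · congr 1
      push_cast [List.length_map, List.length_range]
      ring
    · congr 1
      funext j
      simp only [Function.comp_apply, Nat.succ_eq_add_one]
      congr 1
      push_cast
      ring

lemma pvBuild_eq (n : Int) (hn : 0 ≤ n) (xs : List Int) :
    pvBuildQueue n xs = pvQ ((List.range n.toNat).map (pvCnt xs n)) := by
  unfold pvBuildQueue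
  rw [PySem.List.pyRange_neg_one, show ((n - 1) - (-1)).toNat = n.toNat from by omega,
    pvQ_map_range]
  rw [List.foldl_map]
  rw [PySem.List.foldl_append_eq_flatMap]
  simp only [List.nil_append]
  congr 1
  funext k
  unfold pvCnt
  congr 1
  omega

-- ---- Part B: the port of B equals pvBRun / pvUL ----

lemma pvCeil_zero (c : Nat) : pvCeil c 0 = 0 := by
  unfold pvCeil
  rcases Nat.eq_zero_or_pos c with h | h
  · subst h; rfl
  · exact Nat.div_eq_of_lt (by omega)

lemma pvCeil_rep (c x : Nat) (hc : 1 ≤ c) (hx : 1 ≤ x) : pvCeil c x = (x - 1) / c + 1 := by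
  unfold pvCeil
  rw [show x + c - 1 = (x - 1) + c from by omega, Nat.add_div_right _ (by omega)]

lemma pvCeil_eq_zero_iff (c x : Nat) (hc : 1 ≤ c) : pvCeil c x = 0 ↔ x = 0 := by
  constructor
  · intro h
    by_contra hx
    rw [pvCeil_rep c x hc (by omega)] at h
    simp at h
  · intro h; rw [h]; exact pvCeil_zero c

lemma pvCeil_sub (c x : Nat) (hc : 1 ≤ c) : pvCeil c (x - c) = pvCeil c x - 1 := by
  rcases Nat.eq_zero_or_pos x with hx | hx
  · subst hx; simp [pvCeil_zero]
  by_cases hxc : x ≤ c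
  · rw [show x - c = 0 from by omega, pvCeil_zero, pvCeil_rep c x hc hx,
      Nat.div_eq_of_lt (show x - 1 < c from by omega)]
  · rw [pvCeil_rep c (x - c) hc (by omega), pvCeil_rep c x hc hx,
      show x - 1 = x - c - 1 + c from by omega, Nat.add_div_right _ (by omega)]
    simp

lemma pvCeil_bridge (cap : Int) (hc : 1 ≤ cap) (d : Int) (hd : 0 ≤ d) :
    -(PySem.Int.floordiv (-d) cap) = (pvCeil cap.toNat d.toNat : Int) := by
  have hb : (0 : Int) < cap := by omega
  rw [PySem.Int.neg_floordiv_neg_eq_iff_of_pos (by omega)]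
  have hcap : (cap.toNat : Int) = cap := by omega
  have hd' : (d.toNat : Int) = d := by omega
  set c := cap.toNat with hcdef
  set x := d.toNat with hxdef
  rcases Nat.eq_zero_or_pos x with h0 | h0
  · rw [h0, pvCeil_zero]
    constructor <;> [simp; skip] <;> omega
  · rw [pvCeil_rep c x (by omega) h0]
    set Q : Nat := (x - 1) / c with hQ
    have h := Nat.div_add_mod (x - 1) c
    rw [← hQ] at h
    have hm : (x - 1) % c < c := Nat.mod_lt _ (by omega)
    have hx1 : x - 1 + 1 = x := by omega
    obtain ⟨A, hA⟩ : ∃ A, c * Q = A := ⟨_, rfl⟩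
    have fact1 : Q * c ≤ x - 1 := by
      rw [Nat.mul_comm, hA]; rw [hA] at h; omega
    have fact2 : x ≤ (Q + 1) * c := by
      rw [show (Q + 1) * c = c * Q + c from by ring, hA]; rw [hA] at h; omega
    have cast1 : (Q : Int) * cap ≤ d - 1 := by
      have h5 : ((Q * c : Nat) : Int) ≤ ((x - 1 : Nat) : Int) := by exact_mod_cast fact1
      rw [show ((x - 1 : Nat) : Int) = d - 1 from by omega] at h5
      push_cast at h5
      rw [hcap] at h5
      exact h5
    have cast2 : d ≤ ((Q : Int) + 1) * cap := by
      have h6 : ((x : Nat) : Int) ≤ (((Q + 1) * c : Nat) : Int) := by exact_mod_cast fact2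
      rw [hd'] at h6
      push_cast at h6
      rw [hcap] at h6
      linarith
    constructor
    · rw [show ((Q + 1 : Nat) : Int) - 1 = (Q : Int) from by push_cast; ring]
      linarith
    · push_cast
      linarith

def pvBody (cap : Int) (m : Nat) (g1 g2 : Nat → Nat)
    (st : Int × Int × Int × Int) (k : Nat) : Int × Int × Int × Int :=
  let d2 := st.2.1 + ((g1 k : Nat) : Int)
  let p2 := st.2.2.1 + ((g2 k : Nat) : Int)
  let t := max (-(PySem.Int.floordiv (-d2) cap)) (-(PySem.Int.floordiv (-p2) cap))
  (st.1 + (t - st.2.2.2) * (((m : Int) - k - 1) + 1) * 2, d2, p2, t)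

lemma pvFoldB (cap : Int) (hc : 1 ≤ cap) :
    ∀ (m : Nat) (g1 g2 : Nat → Nat) (a : Int) (d p tr : Nat),
    ((List.range m).foldl (pvBody cap m g1 g2) (a, (d : Int), (p : Int), (tr : Int))).1
    = a + pvBRun cap.toNat m g1 g2 d p tr := by
  intro m
  induction m with
  | zero => intro g1 g2 a d p tr; simp [pvBRun]
  | succ m ih =>
    intro g1 g2 a d p tr
    rw [List.range_succ_eq_map, List.foldl_cons, List.foldl_map]
    have hstep : pvBody cap (m + 1) g1 g2 (a, (d : Int), (p : Int), (tr : Int)) 0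
        = (a + (((max (pvCeil cap.toNat (d + g1 0)) (pvCeil cap.toNat (p + g2 0)) : Nat) : Int) - tr) * ((m : Int) + 1) * 2,
           ((d + g1 0 : Nat) : Int), ((p + g2 0 : Nat) : Int),
           ((max (pvCeil cap.toNat (d + g1 0)) (pvCeil cap.toNat (p + g2 0)) : Nat) : Int)) := by
      simp only [pvBody]
      rw [show (d : Int) + ((g1 0 : Nat) : Int) = ((d + g1 0 : Nat) : Int) from by push_cast; ring,
          show (p : Int) + ((g2 0 : Nat) : Int) = ((p + g2 0 : Nat) : Int) from by push_cast; ring,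
          pvCeil_bridge cap hc _ (by positivity), pvCeil_bridge cap hc _ (by positivity)]
      simp only [Int.toNat_natCast]
      rw [Nat.cast_max]
      congr 2
      push_cast
      ring
    rw [hstep]
    have hfun : (fun (st : Int × Int × Int × Int) (k : Nat) => pvBody cap (m + 1) g1 g2 st (k + 1))
        = pvBody cap m (fun k => g1 (k + 1)) (fun k => g2 (k + 1)) := by
      funext st k
      simp only [pvBody]
      congr 2
      push_cast
      ring
    rw [hfun, ih]
    rw [pvBRun]
    push_cast
    ring

-- function-indexed U-sum
def pvUF (c : Nat) : Nat → (Nat → Nat) → (Nat → Nat) → Nat → Nat → Nat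
  | 0, _, _, _, _ => 0
  | m + 1, g1, g2, d, p =>
    max (pvCeil c (d + g1 0)) (pvCeil c (p + g2 0)) +
      pvUF c m (fun k => g1 (k + 1)) (fun k => g2 (k + 1)) (d + g1 0) (p + g2 0)

lemma pvBRun_eq_UF (c : Nat) : ∀ (m : Nat) (g1 g2 : Nat → Nat) (d p tr : Nat),
    pvBRun c m g1 g2 d p tr = 2 * ((pvUF c m g1 g2 d p : Int) - (m : Int) * tr) := by
  intro m
  induction m with
  | zero => intro g1 g2 d p tr; simp [pvBRun, pvUF]
  | succ m ih =>
    intro g1 g2 d p tr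
    rw [pvBRun, pvUF, ih]
    push_cast
    ring

lemma pvUF_eq_UL (c : Nat) : ∀ (m : Nat) (g1 g2 : Nat → Nat) (d p : Nat),
    pvUF c m g1 g2 d p = pvUL c d p ((List.range m).map g1) ((List.range m).map g2) := by
  intro m
  induction m with
  | zero => intro g1 g2 d p; rw [pvUF]; simp [pvUL]
  | succ m ih =>
    intro g1 g2 d p
    rw [pvUF, List.range_succ_eq_map]
    simp only [List.map_cons, List.map_map]
    rw [pvUL, ih]
    simp [Function.comp_def]

-- ---- Part C: pvG = 2 * pvUL (the crux) ----

lemma pvPre_cons_succ (cc : Nat) (cs : List Nat) (j : Nat) :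
    pvPre (cc :: cs) (j + 1) = cc + pvPre cs j := by
  simp [pvPre, List.take_succ_cons]

lemma pvPre_dec : ∀ (l : List Nat) (k j : Nat), pvPre (pvDec k l) j = pvPre l j - k := by
  intro l
  induction l with
  | nil => intro k j; simp [pvDec, pvPre]
  | cons m rest ih =>
    intro k j
    rw [pvDec]
    split_ifs with h
    · cases j with
      | zero => simp [pvPre]; omega
      | succ j' =>
        rw [pvPre_cons_succ, pvPre_cons_succ, ih]
        omega
    · cases j with
      | zero => simp [pvPre]
      | succ j' =>
        rw [pvPre_cons_succ, pvPre_cons_succ]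
        omega

lemma pvUL_eq_sum (c : Nat) : ∀ (cs ps : List Nat) (d p : Nat), cs.length = ps.length →
    pvUL c d p cs ps
      = ∑ j ∈ Finset.range cs.length,
          max (pvCeil c (d + pvPre cs j)) (pvCeil c (p + pvPre ps j)) := by
  intro cs
  induction cs with
  | nil => intro ps d p h; rw [pvUL]; simp
  | cons cc cs' ih =>
    intro ps d p h
    cases ps with
    | nil => simp at h
    | cons pp ps' =>
      rw [pvUL, ih ps' (d + cc) (p + pp) (by simpa using h), List.length_cons,
        Finset.sum_range_succ']
      have eS : ∀ j ∈ Finset.range cs'.length,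
          max (pvCeil c (d + pvPre (cc :: cs') (j + 1))) (pvCeil c (p + pvPre (pp :: ps') (j + 1)))
            = max (pvCeil c (d + cc + pvPre cs' j)) (pvCeil c (p + pp + pvPre ps' j)) := by
        intro j _
        rw [pvPre_cons_succ, pvPre_cons_succ, Nat.add_assoc, Nat.add_assoc]
      rw [Finset.sum_congr rfl eS,
        show pvPre (cc :: cs') 0 = cc from by simp [pvPre],
        show pvPre (pp :: ps') 0 = pp from by simp [pvPre]]
      exact Nat.add_comm _ _

lemma pvFH_nonneg (l : List Nat) : 0 ≤ pvFH l := by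
  induction l with
  | nil => simp [pvFH]
  | cons c rest ih =>
    rw [pvFH]
    split_ifs
    · exact ih
    · positivity

lemma pvFH_le (l : List Nat) : pvFH l ≤ (l.length : Int) := by
  induction l with
  | nil => simp [pvFH]
  | cons c rest ih =>
    rw [pvFH]
    split_ifs
    · simp only [List.length_cons]
      push_cast
      omega
    · simp

lemma pvCount_ones (cs : List Nat) : ∀ (ps : List Nat), cs.length = ps.length →
    (∑ j ∈ Finset.range cs.length,
        (if 1 ≤ pvPre cs j + pvPre ps j then 1 else 0))
      = (max (pvFH cs) (pvFH ps)).toNat := by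
  induction cs with
  | nil =>
    intro ps h
    cases ps with
    | nil => simp [pvFH]
    | cons pp ps' => simp at h
  | cons cc cs' ih =>
    intro ps h
    cases ps with
    | nil => simp at h
    | cons pp ps' =>
      have h' : cs'.length = ps'.length := by simpa using h
      rw [List.length_cons, Finset.sum_range_succ']
      have hpre0 : ∀ (a : Nat) (l : List Nat), pvPre (a :: l) 0 = a := by
        intro a l; simp [pvPre]
      by_cases hz : cc = 0 ∧ pp = 0
      · obtain ⟨h1, h2⟩ := hz
        subst h1; subst h2
        have eS : ∀ j ∈ Finset.range cs'.length,
            (if 1 ≤ pvPre (0 :: cs') (j + 1) + pvPre (0 :: ps') (j + 1) then (1 : Nat) else 0)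
              = (if 1 ≤ pvPre cs' j + pvPre ps' j then (1 : Nat) else 0) := by
          intro j _
          rw [pvPre_cons_succ, pvPre_cons_succ]
          simp
        rw [Finset.sum_congr rfl eS, ih ps' h', hpre0, hpre0, pvFH, pvFH,
          if_pos rfl, if_pos rfl]
        simp
      · have hsum : 1 ≤ cc + pp := by omega
        have hone : ∀ j ∈ Finset.range cs'.length,
            (if 1 ≤ pvPre (cc :: cs') (j + 1) + pvPre (pp :: ps') (j + 1) then (1 : Nat) else 0)
              = 1 := by
          intro j _
          rw [pvPre_cons_succ, pvPre_cons_succ, if_pos (by omega)]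
        rw [Finset.sum_congr rfl hone, Finset.sum_const, hpre0, hpre0, if_pos (by omega)]
        have hfh1 := pvFH_le cs'
        have hfh2 := pvFH_le ps'
        have hfh3 := pvFH_nonneg cs'
        have hfh4 := pvFH_nonneg ps'
        rw [pvFH, pvFH]
        simp only [smul_eq_mul, Nat.mul_one, Finset.card_range, max_def]
        split_ifs <;> omega

lemma pvKey (c : Nat) (hc : 1 ≤ c) (cs ps : List Nat) (h : cs.length = ps.length) :
    pvUL c 0 0 cs ps
      = (max (pvFH cs) (pvFH ps)).toNat + pvUL c 0 0 (pvDec c cs) (pvDec c ps) := by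
  rw [pvUL_eq_sum c cs ps 0 0 h,
    pvUL_eq_sum c _ _ 0 0 (by rw [pvDec_length, pvDec_length, h]), pvDec_length]
  have hterm : ∀ j ∈ Finset.range cs.length,
      max (pvCeil c (0 + pvPre (pvDec c cs) j)) (pvCeil c (0 + pvPre (pvDec c ps) j))
        = max (pvCeil c (0 + pvPre cs j)) (pvCeil c (0 + pvPre ps j)) - 1 := by
    intro j _
    rw [pvPre_dec, pvPre_dec]
    simp only [Nat.zero_add]
    rw [pvCeil_sub _ _ hc, pvCeil_sub _ _ hc]
    omega
  rw [Finset.sum_congr rfl hterm]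
  have hsplit : ∀ j ∈ Finset.range cs.length,
      max (pvCeil c (0 + pvPre cs j)) (pvCeil c (0 + pvPre ps j))
        = (max (pvCeil c (0 + pvPre cs j)) (pvCeil c (0 + pvPre ps j)) - 1)
          + (if 1 ≤ pvPre cs j + pvPre ps j then 1 else 0) := by
    intro j _
    have e1 := pvCeil_eq_zero_iff c (0 + pvPre cs j) hc
    have e2 := pvCeil_eq_zero_iff c (0 + pvPre ps j) hc
    by_cases hp : 1 ≤ pvPre cs j + pvPre ps j
    · rw [if_pos hp]
      rcases Nat.lt_or_ge (pvPre cs j) 1 with h1 | h1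
      · have h2 : pvCeil c (0 + pvPre ps j) ≠ 0 := by
          rw [Ne, e2]; omega
        omega
      · have h2 : pvCeil c (0 + pvPre cs j) ≠ 0 := by
          rw [Ne, e1]; omega
        omega
    · rw [if_neg hp]
      have h1 : pvCeil c (0 + pvPre cs j) = 0 := by rw [e1]; omega
      have h2 : pvCeil c (0 + pvPre ps j) = 0 := by rw [e2]; omega
      rw [h1, h2]
      simp
  rw [Finset.sum_congr rfl hsplit, Finset.sum_add_distrib, pvCount_ones cs ps h]
  omega

lemma pvUL_zero (c : Nat) : ∀ (cs ps : List Nat), cs.sum = 0 → ps.sum = 0 →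
    pvUL c 0 0 cs ps = 0 := by
  intro cs
  induction cs with
  | nil => intro ps _ _; rw [pvUL]
  | cons cc cs' ih =>
    intro ps h1 h2
    cases ps with
    | nil => rw [pvUL]
    | cons pp ps' =>
      simp only [List.sum_cons] at h1 h2
      rw [pvUL, show cc = 0 from by omega, show pp = 0 from by omega]
      simp [pvCeil_zero, ih ps' (by omega) (by omega)]

lemma pvCore (c : Nat) (hc : 1 ≤ c) : ∀ (fuel : Nat) (cs ps : List Nat),
    cs.length = ps.length → cs.sum + ps.sum ≤ fuel →
    pvG c fuel cs ps = 2 * (pvUL c 0 0 cs ps : Int) := by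
  intro fuel
  induction fuel with
  | zero =>
    intro cs ps hlen hsum
    rw [pvG, pvUL_zero c cs ps (by omega) (by omega)]
    simp
  | succ f ih =>
    intro cs ps hlen hsum
    rw [pvG]
    by_cases h : cs.sum + ps.sum = 0
    · rw [if_pos h, pvUL_zero c cs ps (by omega) (by omega)]
      simp
    · rw [if_neg h]
      rw [ih (pvDec c cs) (pvDec c ps) (by rw [pvDec_length, pvDec_length, hlen])
        (by rw [pvDec_sum, pvDec_sum]; omega)]
      rw [pvKey c hc cs ps hlen]
      have hnn : 0 ≤ max (pvFH cs) (pvFH ps) := le_max_of_le_left (pvFH_nonneg cs)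
      push_cast [Int.toNat_of_nonneg hnn]
      ring

-- ---- Part D: assembly ----

lemma pvZero_n (cap n : Int) (hn : n ≤ 0) (dl pl : List Int) :
    solution cap n dl pl = 0 ∧ solution_alt cap n dl pl = 0 := by
  have hr : PySem.List.pyRange (n - 1) (-1) (-1) = [] :=
    PySem.List.pyRange_neg_one_eq_nil (by omega)
  constructor
  · unfold solution pvBuildQueue
    rw [hr]
    simp [pvMainLoop]
  · unfold solution_alt
    rw [hr]
    simp

lemma pvZero_counts (cap n : Int) (_hcap : cap ≠ 0) (hn : 0 ≤ n) (dl pl : List Int)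
    (h : ∀ j ∈ List.range n.toNat, dl.getD j 0 ≤ 0 ∧ pl.getD j 0 ≤ 0) :
    solution cap n dl pl = 0 ∧ solution_alt cap n dl pl = 0 := by
  have hflo : PySem.Int.floordiv 0 cap = 0 := by
    simp [PySem.Int.floordiv]
  have hmem : ∀ i ∈ PySem.List.pyRange (n - 1) (-1) (-1),
      PySem.List.pyGetD dl i 0 ≤ 0 ∧ PySem.List.pyGetD pl i 0 ≤ 0 := by
    intro i hi
    rw [PySem.List.mem_pyRange_neg_one] at hi
    have h0 : i = ((i.toNat : Nat) : Int) := by omega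
    rw [h0, PySem.List.pyGetD_natCast, PySem.List.pyGetD_natCast]
    exact h i.toNat (by rw [List.mem_range]; omega)
  constructor
  · have hbuild : ∀ (xs : List Int),
        (∀ i ∈ PySem.List.pyRange (n - 1) (-1) (-1), PySem.List.pyGetD xs i 0 ≤ 0) →
        pvBuildQueue n xs = [] := by
      intro xs hx
      unfold pvBuildQueue
      have key : ∀ (L : List Int) (init : List Int), (∀ i ∈ L, PySem.List.pyGetD xs i 0 ≤ 0) →
          L.foldl (fun q i => q ++ List.replicate (PySem.List.pyGetD xs i 0).toNat (i + 1)) init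
            = init := by
        intro L
        induction L with
        | nil => intro init _; rfl
        | cons i L' ihL =>
          intro init hL
          rw [List.foldl_cons]
          have hz : (PySem.List.pyGetD xs i 0).toNat = 0 := by
            have := hL i (List.mem_cons_self ..)
            omega
          rw [hz]
          simp only [List.replicate_zero, List.append_nil]
          exact ihL init (fun j hj => hL j (List.mem_cons_of_mem _ hj))
      exact key _ [] hx
    unfold solution
    rw [hbuild dl (fun i hi => (hmem i hi).1), hbuild pl (fun i hi => (hmem i hi).2)]
    simp [pvMainLoop]
  · unfold solution_alt
    have key : ∀ (L : List Int), (∀ i ∈ L, PySem.List.pyGetD dl i 0 ≤ 0 ∧ PySem.List.pyGetD pl i 0 ≤ 0) →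
        L.foldl
          (fun (st : Int × Int × Int × Int) i =>
            let d := st.2.1 + max (PySem.List.pyGetD dl i 0) 0
            let p := st.2.2.1 + max (PySem.List.pyGetD pl i 0) 0
            let t := max (-(PySem.Int.floordiv (-d) cap)) (-(PySem.Int.floordiv (-p) cap))
            (st.1 + (t - st.2.2.2) * (i + 1) * 2, d, p, t))
          (0, 0, 0, 0) = ((0 : Int), (0 : Int), (0 : Int), (0 : Int)) := by
      intro L
      induction L with
      | nil => intro _; rfl
      | cons i L' ihL =>
        intro hL
        rw [List.foldl_cons]
        have h1 := (hL i (List.mem_cons_self ..)).1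
        have h2 := (hL i (List.mem_cons_self ..)).2
        have e1 : max (PySem.List.pyGetD dl i 0) 0 = 0 := by omega
        have e2 : max (PySem.List.pyGetD pl i 0) 0 = 0 := by omega
        refine Eq.trans (congrArg (fun s => List.foldl _ s L') ?_)
          (ihL (fun j hj => hL j (List.mem_cons_of_mem _ hj)))
        simp only [e1, e2]
        norm_num [hflo]
    rw [key _ hmem]

lemma pvMain (cap n : Int) (hc : 1 ≤ cap) (hn : 0 ≤ n) (dl pl : List Int) :
    solution cap n dl pl = solution_alt cap n dl pl := by
  have hc' : 1 ≤ cap.toNat := by omega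
  have hlen : ((List.range n.toNat).map (pvCnt dl n)).length
      = ((List.range n.toNat).map (pvCnt pl n)).length := by simp
  have hA : solution cap n dl pl
      = pvG cap.toNat
          (((List.range n.toNat).map (pvCnt dl n)).sum + ((List.range n.toNat).map (pvCnt pl n)).sum)
          ((List.range n.toNat).map (pvCnt dl n)) ((List.range n.toNat).map (pvCnt pl n)) := by
    unfold solution
    rw [pvBuild_eq n hn dl, pvBuild_eq n hn pl]
    simp only [pvQ_length]
    rw [pvMainLoop_eq_G cap hc]
    ring
  have hF := pvFoldB cap hc n.toNat (pvCnt dl n) (pvCnt pl n) 0 0 0 0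
  norm_num at hF
  have hB : solution_alt cap n dl pl
      = 2 * (pvUL cap.toNat 0 0
          ((List.range n.toNat).map (pvCnt dl n)) ((List.range n.toNat).map (pvCnt pl n)) : Int) := by
    unfold solution_alt
    rw [PySem.List.pyRange_neg_one, show ((n - 1) - (-1)).toNat = n.toNat from by omega,
      List.foldl_map]
    refine Eq.trans ?_ (?_ : pvBRun cap.toNat n.toNat (pvCnt dl n) (pvCnt pl n) 0 0 0
      = 2 * (pvUL cap.toNat 0 0 ((List.range n.toNat).map (pvCnt dl n))
          ((List.range n.toNat).map (pvCnt pl n)) : Int))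
    · refine Eq.trans ?_ hF
      congr 1
      congr 1
      funext st k
      dsimp only [pvBody, pvCnt]
      simp only [Int.toNat_eq_max]
      rw [show max n 0 - (k : Int) - 1 + 1 = n - 1 - (k : Int) + 1 from by omega]
    · rw [pvBRun_eq_UF, pvUF_eq_UL]
      push_cast
      ring
  rw [hA, hB]
  exact pvCore cap.toNat hc' _ _ _ hlen (le_refl _)

-- ===== VERDICT (by name: the statement is the Claim_ definition above) =====
theorem solution_spec : Claim_equal_solution := by
  intro cap n dl pl _hdom hpre
  unfold Spec_solution
  rcases hpre with ⟨_, _, hcase⟩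
  by_cases hn : n ≤ 0
  · have h1 := pvZero_n cap n hn dl pl
    rw [h1.1, h1.2]
  · have hn' : 0 ≤ n := by omega
    rcases hcase with hcap | hn0 | ⟨hc0, hz⟩
    · exact pvMain cap n hcap hn' dl pl
    · omega
    · have h1 := pvZero_counts cap n hc0 hn' dl pl hz
      rw [h1.1, h1.2]
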